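-- pv_equiv track=rewrite | github.com/Unagi-zoso/five-golds-in-a-day | kakao_blind_22_6.py | solution
-- ===== SOURCE A (Python) =====
-- def solution(board, skill):
--     mx_r = len(board)
--     mx_c = len(board[0])
--     total_degree = [[0 for _ in range(mx_c+1)] for _ in range(mx_r+1)]
--
--     type_assign = [999, -1, 1]
--     for type, r1, c1, r2, c2, degree in skill:
--         total_degree[r1][c1] += (type_assign[type] * degree)
--         total_degree[r1][c2+1] += (type_assign[type] * -degree)
--         total_degree[r2+1][c1] += (type_assign[type] * -degree)
--         total_degree[r2+1][c2+1] += (type_assign[type] * degree) # r1,c2+1 케이스와 r2+1,c1 케이스에서 두 번 degree를 뺴버려 한 번 복구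
--
--     for r in range(mx_r):
--         for c in range(mx_c):
--             total_degree[r+1][c] += total_degree[r][c]
--             total_degree[r][c+1] += total_degree[r][c]
--             total_degree[r+1][c+1] -= total_degree[r][c]
--
--     answer = 0
--     for r in range(mx_r):
--         for c in range(mx_c):
--             if board[r][c] + total_degree[r][c] >= 1:
--                 answer += 1
--     return answer
-- ===== SOURCE B (Python) =====
-- def solution(board, skill):
--     type_assign = [999, -1, 1]
--     answer = 0
--     for r, row in enumerate(board):
--         for c in range(len(board[0])):
--             total = row[c]
--             for t, r1, c1, r2, c2, degree in skill:
--                 if r1 <= r <= r2 and c1 <= c <= c2: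
--                     total += type_assign[t] * degree
--             if total >= 1:
--                 answer += 1
--     return answer
-- ===== Notes on version B (the rewrite author's own statement) =====
-- stated objective: simpler
-- what changed: B drops the (mx_r+1)x(mx_c+1) 2-D difference array and prefix-sum pass entirely and instead, for each board cell, sums the contribution of every skill whose rectangle covers that cell, counting cells whose total is >= 1.
-- outside the precondition, e.g. on solution([[0], [0], [0]], [[1, 2, 0, 0, 0, 1]]): A returns 1, B returns 0; on solution([[1]], [[1, -1, 0, 0, 0, 1]]): A returns 1, B returns 0
import Mathlib
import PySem

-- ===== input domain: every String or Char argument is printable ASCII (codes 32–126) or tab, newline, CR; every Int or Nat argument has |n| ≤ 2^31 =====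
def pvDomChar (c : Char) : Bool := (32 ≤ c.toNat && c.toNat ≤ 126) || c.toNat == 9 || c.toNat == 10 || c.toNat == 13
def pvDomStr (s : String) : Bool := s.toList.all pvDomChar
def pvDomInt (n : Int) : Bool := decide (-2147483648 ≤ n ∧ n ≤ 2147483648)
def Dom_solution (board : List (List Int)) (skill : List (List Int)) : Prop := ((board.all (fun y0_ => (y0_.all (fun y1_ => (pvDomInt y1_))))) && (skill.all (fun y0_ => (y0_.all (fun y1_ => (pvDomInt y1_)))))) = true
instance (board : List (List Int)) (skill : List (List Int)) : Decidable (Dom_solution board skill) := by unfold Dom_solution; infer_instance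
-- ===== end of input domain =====

-- B drops A's (mx_r+1) x (mx_c+1) difference array and its prefix-sum pass entirely and instead
-- sums, per board cell, the contribution of every skill whose rectangle covers it (objective:
-- simpler -- no auxiliary table; same return value on Pre_solution).


-- ===== PORT A =====
-- total_degree[i][j] += v  (read-modify-write; pySetD/pyGetD are exact for the in-range
-- indices guaranteed by Pre_solution)
def aUpd (g : List (List Int)) (i j v : Int) : List (List Int) :=
  PySem.List.pySetD g i
    (PySem.List.pySetD (PySem.List.pyGetD g i []) j
      (PySem.List.pyGetD (PySem.List.pyGetD g i []) j 0 + v))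

-- proof-side grid view

def aSkillStep (g : List (List Int)) (s : List Int) : List (List Int) :=
  match s with
  | [t, r1, c1, r2, c2, degree] =>
    let g := aUpd g r1 c1 (PySem.List.pyGetD [999, -1, 1] t 0 * degree)
    let g := aUpd g r1 (c2 + 1) (PySem.List.pyGetD [999, -1, 1] t 0 * (-degree))
    let g := aUpd g (r2 + 1) c1 (PySem.List.pyGetD [999, -1, 1] t 0 * (-degree))
    aUpd g (r2 + 1) (c2 + 1) (PySem.List.pyGetD [999, -1, 1] t 0 * degree)
  | _ => g

def aPrefixStep (g : List (List Int)) (r c : Nat) : List (List Int) :=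
  let g := aUpd g ((r : Int) + 1) (c : Int)
             (PySem.List.pyGetD (PySem.List.pyGetD g (r : Int) []) (c : Int) 0)
  let g := aUpd g (r : Int) ((c : Int) + 1)
             (PySem.List.pyGetD (PySem.List.pyGetD g (r : Int) []) (c : Int) 0)
  aUpd g ((r : Int) + 1) ((c : Int) + 1)
    (-(PySem.List.pyGetD (PySem.List.pyGetD g (r : Int) []) (c : Int) 0))

def solution (board : List (List Int)) (skill : List (List Int)) : Int :=
  let mxr := board.length
  let mxc := (board.headD []).length
  let g0 : List (List Int) := List.replicate (mxr + 1) (List.replicate (mxc + 1) 0)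
  let g1 := skill.foldl aSkillStep g0
  let g2 := (List.range mxr).foldl
              (fun g r => (List.range mxc).foldl (fun g c => aPrefixStep g r c) g) g1
  (List.range mxr).foldl (fun answer (r : Nat) =>
    (List.range mxc).foldl (fun answer (c : Nat) =>
      if PySem.List.pyGetD (PySem.List.pyGetD board (r : Int) []) (c : Int) 0 +
           PySem.List.pyGetD (PySem.List.pyGetD g2 (r : Int) []) (c : Int) 0 ≥ 1
      then answer + 1 else answer) answer) 0

-- ===== PORT B =====
-- running total of type_assign[t]*degree over the skills whose rectangle covers cell (r, c)
def bCellTotal (skill : List (List Int)) (r c : Int) (start : Int) : Int :=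
  skill.foldl (fun total s =>
    match s with
    | [t, r1, c1, r2, c2, degree] =>
      if r1 ≤ r ∧ r ≤ r2 ∧ c1 ≤ c ∧ c ≤ c2
      then total + PySem.List.pyGetD [999, -1, 1] t 0 * degree
      else total
    | _ => total) start

def solution_alt (board : List (List Int)) (skill : List (List Int)) : Int :=
  (PySem.List.enumerate board).foldl (fun answer p =>
    (List.range (board.headD []).length).foldl (fun answer (c : Nat) =>
      if bCellTotal skill p.1 (c : Int) (PySem.List.pyGetD p.2 (c : Int) 0) ≥ 1
      then answer + 1 else answer) answer) 0

-- ===== PRECONDITION & SPEC =====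
-- one skill row is well-formed: 6 entries, type a valid index into type_assign (Python's
-- negative indices -3..-1 included), corners ordered and inside the (mxr+1) x (mxc+1) table
def SkOKb (mxr mxc : Nat) (s : List Int) : Bool :=
  match s with
  | [t, r1, c1, r2, c2, _] =>
    decide (-3 ≤ t ∧ t ≤ 2 ∧ 0 ≤ r1 ∧ r1 ≤ r2 ∧ r2 + 1 ≤ (mxr : Int) ∧
            0 ≤ c1 ∧ c1 ≤ c2 ∧ c2 + 1 ≤ (mxc : Int))
  | _ => False

-- Pre_ excludes the inputs where A raises (empty board, a row shorter than row 0, a skill row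
-- of arity != 6 or indexing outside the table) and, besides those, the degenerate skills with
-- swapped corners (r1 > r2 or c1 > c2) or negative corners hitting the table through Python's
-- negative-index wraparound, on which A's difference-array value is accidental.
def Pre_solution (board : List (List Int)) (skill : List (List Int)) : Prop :=
  board ≠ [] ∧ (∀ row ∈ board, (board.headD []).length ≤ row.length) ∧
  (∀ s ∈ skill, SkOKb board.length (board.headD []).length s = true)

instance (board : List (List Int)) (skill : List (List Int)) : Decidable (Pre_solution board skill) := by
  unfold Pre_solution; infer_instance

def pvWitness_solution : List (List Int) × List (List Int) :=
  ([[1, 0], [0, 2]], [[1, 0, 0, 1, 1, 1], [2, 0, 0, 0, 0, 3]])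

def Spec_solution (board : List (List Int)) (skill : List (List Int)) (out : Int) : Prop := out = solution_alt board skill
instance (board : List (List Int)) (skill : List (List Int)) (out : Int) : Decidable (Spec_solution board skill out) := by unfold Spec_solution; infer_instance

-- ===== CLAIM (what is proved, stated in full; the proofs are below) =====
def Claim_equal_solution : Prop := ∀ (board : List (List Int)) (skill : List (List Int)), Dom_solution board skill → Pre_solution board skill → Spec_solution board skill (solution board skill)

-- ===== LEMMAS AND PROOFS =====
def gg (g : List (List Int)) (i j : Nat) : Int := (g.getD i []).getD j 0

def Sh (R C : Nat) (g : List (List Int)) : Prop :=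
  g.length = R ∧ ∀ row ∈ g, row.length = C

theorem Sh_row {R C : Nat} {g : List (List Int)} (hg : Sh R C g) {i : Nat} (hi : i < R) :
    (g.getD i []).length = C := by
  obtain ⟨hl, hr⟩ := hg
  have : i < g.length := by omega
  rw [List.getD_eq_getElem?_getD, List.getElem?_eq_getElem this]
  exact hr _ (List.getElem_mem this)

theorem aUpd_cast (g : List (List Int)) (i j : Nat) (v : Int) :
    aUpd g (i : Int) (j : Int) v
      = g.set i ((g.getD i []).set j ((g.getD i []).getD j 0 + v)) := by
  simp [aUpd, PySem.List.pySetD_natCast, PySem.List.pyGetD_natCast]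

theorem Sh_aUpd {R C : Nat} {g : List (List Int)} (hg : Sh R C g) {i : Nat} (hi : i < R)
    (j : Nat) (v : Int) : Sh R C (aUpd g (i : Int) (j : Int) v) := by
  rw [aUpd_cast]
  have hrowlen := Sh_row hg hi
  obtain ⟨hl, hr⟩ := hg
  refine ⟨by simpa using hl, ?_⟩
  intro row hrow
  rcases List.mem_or_eq_of_mem_set hrow with h | h
  · exact hr _ h
  · subst h
    rw [List.length_set]
    exact hrowlen

theorem gg_aUpd {R C : Nat} {g : List (List Int)} (hg : Sh R C g) {i j : Nat}
    (hi : i < R) (hj : j < C) (v : Int) (i' j' : Nat) :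
    gg (aUpd g (i : Int) (j : Int) v) i' j'
      = gg g i' j' + (if i' = i ∧ j' = j then v else 0) := by
  have hig : i < g.length := by rw [hg.1]; exact hi
  have hjr : j < (g.getD i []).length := by rw [Sh_row hg hi]; exact hj
  rw [aUpd_cast]
  unfold gg
  simp only [List.getD_eq_getElem?_getD] at hjr ⊢
  by_cases hii : i' = i
  · subst hii
    rw [List.getElem?_set_self (by simpa using hig)]
    by_cases hjj : j' = j
    · subst hjj
      rw [Option.getD_some, List.getElem?_set_self hjr]
      simp
    · rw [Option.getD_some, List.getElem?_set_ne (by omega : j ≠ j')]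
      simp [hjj]
  · rw [List.getElem?_set_ne (by omega : i ≠ i')]
    simp [hii]

theorem gg_aUpdI {R C : Nat} {g : List (List Int)} (hg : Sh R C g) {i j : Int}
    (hi0 : 0 ≤ i) (hi : i < (R : Int)) (hj0 : 0 ≤ j) (hj : j < (C : Int)) (v : Int)
    (i' j' : Nat) :
    gg (aUpd g i j v) i' j'
      = gg g i' j' + (if (i' : Int) = i ∧ (j' : Int) = j then v else 0) := by
  have h1 : i = ((i.toNat : Nat) : Int) := by omega
  have h2 : j = ((j.toNat : Nat) : Int) := by omega
  rw [h1, h2, gg_aUpd hg (by omega) (by omega) v i' j']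
  congr 1
  have : (i' = i.toNat ∧ j' = j.toNat) ↔ ((i' : Int) = ↑i.toNat ∧ (j' : Int) = ↑j.toNat) := by
    omega
  simp only [this]

theorem Sh_aUpdI {R C : Nat} {g : List (List Int)} (hg : Sh R C g) {i : Int}
    (hi0 : 0 ≤ i) (hi : i < (R : Int)) (j : Int) (hj0 : 0 ≤ j) (v : Int) :
    Sh R C (aUpd g i j v) := by
  have h1 : i = ((i.toNat : Nat) : Int) := by omega
  have h2 : j = ((j.toNat : Nat) : Int) := by omega
  rw [h1, h2]
  exact Sh_aUpd hg (by omega) _ v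

-- initial grid

theorem gg_replicate (R C : Nat) (i j : Nat) :
    gg (List.replicate R (List.replicate C (0 : Int))) i j = 0 := by
  unfold gg
  simp only [List.getD_eq_getElem?_getD, List.getElem?_replicate]
  split_ifs <;> simp [List.getElem?_replicate] <;> split_ifs <;> simp

theorem Sh_replicate (R C : Nat) :
    Sh R C (List.replicate R (List.replicate C (0 : Int))) := by
  constructor
  · simp
  · intro row hrow
    rw [List.eq_of_mem_replicate hrow]
    simp

def cont4 (s : List Int) (i j : Nat) : Int :=
  match s with
  | [t, r1, c1, r2, c2, d] =>
    let v := PySem.List.pyGetD [999, -1, 1] t 0 * d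
    (if (i : Int) = r1 ∧ (j : Int) = c1 then v else 0)
      + (if (i : Int) = r1 ∧ (j : Int) = c2 + 1 then -v else 0)
      + (if (i : Int) = r2 + 1 ∧ (j : Int) = c1 then -v else 0)
      + (if (i : Int) = r2 + 1 ∧ (j : Int) = c2 + 1 then v else 0)
  | _ => 0

theorem Sh_aSkillStep {mxr mxc : Nat} {g : List (List Int)} (hg : Sh (mxr + 1) (mxc + 1) g)
    {s : List Int} (hs : SkOKb mxr mxc s = true) :
    Sh (mxr + 1) (mxc + 1) (aSkillStep g s) := by
  match s with
  | [t, r1, c1, r2, c2, d] =>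
    simp only [SkOKb, decide_eq_true_eq] at hs
    obtain ⟨h1, h2, h3, h4, h5, h6, h7, h8⟩ := hs
    have hR : ((mxr : Int) + 1) ≤ ((mxr + 1 : Nat) : Int) := by push_cast; omega
    have hstep : aSkillStep g [t, r1, c1, r2, c2, d]
        = aUpd (aUpd (aUpd (aUpd g r1 c1 (PySem.List.pyGetD [999, -1, 1] t 0 * d))
            r1 (c2 + 1) (PySem.List.pyGetD [999, -1, 1] t 0 * (-d)))
            (r2 + 1) c1 (PySem.List.pyGetD [999, -1, 1] t 0 * (-d)))
            (r2 + 1) (c2 + 1) (PySem.List.pyGetD [999, -1, 1] t 0 * d) := rfl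
    rw [hstep]
    exact Sh_aUpdI (i := r2 + 1)
      (Sh_aUpdI (i := r2 + 1)
        (Sh_aUpdI (i := r1)
          (Sh_aUpdI (i := r1) hg (by omega) (by omega) c1 (by omega) _)
          (by omega) (by omega) (c2 + 1) (by omega) _)
        (by omega) (by omega) c1 (by omega) _)
      (by omega) (by omega) (c2 + 1) (by omega) _

theorem gg_aSkillStep {mxr mxc : Nat} {g : List (List Int)} (hg : Sh (mxr + 1) (mxc + 1) g)
    {s : List Int} (hs : SkOKb mxr mxc s = true) (i j : Nat) :
    gg (aSkillStep g s) i j = gg g i j + cont4 s i j := by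
  match s with
  | [t, r1, c1, r2, c2, d] =>
    simp only [SkOKb, decide_eq_true_eq] at hs
    obtain ⟨h1, h2, h3, h4, h5, h6, h7, h8⟩ := hs
    have hstep : aSkillStep g [t, r1, c1, r2, c2, d]
        = aUpd (aUpd (aUpd (aUpd g r1 c1 (PySem.List.pyGetD [999, -1, 1] t 0 * d))
            r1 (c2 + 1) (PySem.List.pyGetD [999, -1, 1] t 0 * (-d)))
            (r2 + 1) c1 (PySem.List.pyGetD [999, -1, 1] t 0 * (-d)))
            (r2 + 1) (c2 + 1) (PySem.List.pyGetD [999, -1, 1] t 0 * d) := rfl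
    rw [hstep]
    have sh1 := Sh_aUpdI (i := r1) hg (by omega) (by omega) c1 (by omega)
      (PySem.List.pyGetD [999, -1, 1] t 0 * d)
    have sh2 := Sh_aUpdI (i := r1) sh1 (by omega) (by omega) (c2 + 1) (by omega)
      (PySem.List.pyGetD [999, -1, 1] t 0 * (-d))
    have sh3 := Sh_aUpdI (i := r2 + 1) sh2 (by omega) (by omega) c1 (by omega)
      (PySem.List.pyGetD [999, -1, 1] t 0 * (-d))
    rw [gg_aUpdI (i := r2 + 1) (j := c2 + 1) sh3 (by omega) (by omega) (by omega) (by omega),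
        gg_aUpdI (i := r2 + 1) (j := c1) sh2 (by omega) (by omega) (by omega) (by omega),
        gg_aUpdI (i := r1) (j := c2 + 1) sh1 (by omega) (by omega) (by omega) (by omega),
        gg_aUpdI (i := r1) (j := c1) hg (by omega) (by omega) (by omega) (by omega)]
    unfold cont4
    ring_nf

def sumCont (skill : List (List Int)) (i j : Nat) : Int :=
  (skill.map (fun s => cont4 s i j)).sum

theorem skillFold {mxr mxc : Nat} :
    ∀ (sk : List (List Int)) (g : List (List Int)), Sh (mxr + 1) (mxc + 1) g →
      (∀ s ∈ sk, SkOKb mxr mxc s = true) →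
      Sh (mxr + 1) (mxc + 1) (sk.foldl aSkillStep g) ∧
        ∀ i j : Nat, gg (sk.foldl aSkillStep g) i j = gg g i j + sumCont sk i j := by
  intro sk
  induction sk with
  | nil => intro g hg _; exact ⟨hg, by simp [sumCont]⟩
  | cons s tl ih =>
    intro g hg hok
    have hs := hok s (by simp)
    have htl : ∀ x ∈ tl, SkOKb mxr mxc x = true := fun x hx => hok x (by simp [hx])
    obtain ⟨ih1, ih2⟩ := ih (aSkillStep g s) (Sh_aSkillStep hg hs) htl
    refine ⟨by simpa using ih1, ?_⟩
    intro i j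
    have := ih2 i j
    simp only [List.foldl_cons] at *
    rw [this, gg_aSkillStep hg hs]
    simp [sumCont]
    ring

def ps (G : Nat → Nat → Int) (r c : Nat) : Int :=
  ∑ i ∈ Finset.range (r + 1), ∑ j ∈ Finset.range (c + 1), G i j

theorem ps_succ_row (G : Nat → Nat → Int) (r c : Nat) :
    ps G (r + 1) c = ps G r c + ∑ j ∈ Finset.range (c + 1), G (r + 1) j := by
  simp [ps, Finset.sum_range_succ]

theorem ps_zero_zero (G : Nat → Nat → Int) : ps G 0 0 = G 0 0 := by simp [ps]

theorem ps_zero_succ (G : Nat → Nat → Int) (c : Nat) :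
    ps G 0 (c + 1) = ps G 0 c + G 0 (c + 1) := by
  simp [ps, Finset.sum_range_succ]

theorem ps_succ_zero (G : Nat → Nat → Int) (r : Nat) :
    ps G (r + 1) 0 = ps G r 0 + G (r + 1) 0 := by
  simp [ps, Finset.sum_range_succ]

theorem ps_succ_succ (G : Nat → Nat → Int) (r c : Nat) :
    ps G (r + 1) (c + 1) = ps G r (c + 1) + ps G (r + 1) c - ps G r c + G (r + 1) (c + 1) := by
  rw [ps_succ_row, ps_succ_row, Finset.sum_range_succ]
  ring

theorem ps_unfold (G : Nat → Nat → Int) (i j : Nat) :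
    G i j + (if 0 < i then ps G (i - 1) j else 0) + (if 0 < j then ps G i (j - 1) else 0)
      - (if 0 < i ∧ 0 < j then ps G (i - 1) (j - 1) else 0) = ps G i j := by
  match i, j with
  | 0, 0 => simp [ps_zero_zero]
  | 0, j' + 1 => simp [ps_zero_succ]; ring
  | i' + 1, 0 => simp [ps_succ_zero]; ring
  | i' + 1, j' + 1 => simp [ps_succ_succ]; ring

def PInv (G : Nat → Nat → Int) (mxr mxc a b : Nat) (g : List (List Int)) : Prop :=
  ∀ i j : Nat, i ≤ mxr → j ≤ mxc →
    gg g i j = G i j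
      + (if 0 < i ∧ j < mxc ∧ (i - 1 < a ∨ (i - 1 = a ∧ j < b)) then ps G (i - 1) j else 0)
      + (if 0 < j ∧ (i < a ∨ (i = a ∧ j - 1 < b)) then ps G i (j - 1) else 0)
      - (if 0 < i ∧ 0 < j ∧ (i - 1 < a ∨ (i - 1 = a ∧ j - 1 < b)) then ps G (i - 1) (j - 1) else 0)

theorem PInv_extract {G : Nat → Nat → Int} {mxr mxc a b : Nat} {g : List (List Int)}
    (h : PInv G mxr mxc a b g) (i j : Nat) (hi : i ≤ mxr) (hj : j ≤ mxc)
    (e1 : (0 < i ∧ j < mxc ∧ (i - 1 < a ∨ (i - 1 = a ∧ j < b))) ↔ 0 < i)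
    (e2 : (0 < j ∧ (i < a ∨ (i = a ∧ j - 1 < b))) ↔ 0 < j)
    (e3 : (0 < i ∧ 0 < j ∧ (i - 1 < a ∨ (i - 1 = a ∧ j - 1 < b))) ↔ (0 < i ∧ 0 < j)) :
    gg g i j = ps G i j := by
  rw [h i j hi hj, if_congr e1 rfl rfl, if_congr e2 rfl rfl, if_congr e3 rfl rfl, ps_unfold]

theorem PInv_step {G : Nat → Nat → Int} {mxr mxc a b : Nat} {g : List (List Int)}
    (hg : Sh (mxr + 1) (mxc + 1) g) (ha : a < mxr) (hb : b < mxc)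
    (hInv : PInv G mxr mxc a b g) :
    Sh (mxr + 1) (mxc + 1) (aPrefixStep g a b) ∧
      PInv G mxr mxc a (b + 1) (aPrefixStep g a b) := by
  -- the value read by the loop body is the finished prefix sum at (a, b)
  have hx : gg g a b = ps G a b :=
    PInv_extract hInv a b (by omega) (by omega) (by omega) (by omega) (by omega)
  -- rewrite the step as three Nat-indexed updates of the value x
  have hread : ∀ g' : List (List Int),
      PySem.List.pyGetD (PySem.List.pyGetD g' (a : Int) []) (b : Int) 0 = gg g' a b := by
    intro g'; simp [gg, PySem.List.pyGetD_natCast]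
  have hc1 : ((a : Int) + 1) = (((a + 1 : Nat)) : Int) := by push_cast; ring
  have hc2 : ((b : Int) + 1) = (((b + 1 : Nat)) : Int) := by push_cast; ring
  have hstep : aPrefixStep g a b =
      (let g1 := aUpd g ((a + 1 : Nat) : Int) (b : Int) (gg g a b)
       let g2 := aUpd g1 (a : Int) ((b + 1 : Nat) : Int) (gg g1 a b)
       aUpd g2 ((a + 1 : Nat) : Int) ((b + 1 : Nat) : Int) (-(gg g2 a b))) := by
    simp only [aPrefixStep, hread, hc1, hc2]
  have sh1 : Sh (mxr + 1) (mxc + 1) (aUpd g ((a + 1 : Nat) : Int) (b : Int) (gg g a b)) :=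
    Sh_aUpd hg (by omega) _ _
  set g1 := aUpd g ((a + 1 : Nat) : Int) (b : Int) (gg g a b) with hg1
  have r1 : gg g1 a b = gg g a b := by
    rw [hg1, gg_aUpd hg (by omega) (by omega)]
    simp
  have sh2 : Sh (mxr + 1) (mxc + 1) (aUpd g1 (a : Int) ((b + 1 : Nat) : Int) (gg g1 a b)) :=
    Sh_aUpd sh1 (by omega) _ _
  set g2 := aUpd g1 (a : Int) ((b + 1 : Nat) : Int) (gg g1 a b) with hg2
  have r2 : gg g2 a b = gg g1 a b := by
    rw [hg2, gg_aUpd sh1 (by omega) (by omega)]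
    simp
  have sh3 : Sh (mxr + 1) (mxc + 1)
      (aUpd g2 ((a + 1 : Nat) : Int) ((b + 1 : Nat) : Int) (-(gg g2 a b))) :=
    Sh_aUpd sh2 (by omega) _ _
  rw [hstep]
  simp only [← hg2]
  refine ⟨sh3, ?_⟩
  intro i j hi hj
  rw [gg_aUpd sh2 (by omega) (by omega), hg2, gg_aUpd sh1 (by omega) (by omega), hg1,
      gg_aUpd hg (by omega) (by omega), r2, r1, hx, hInv i j hi hj]
  -- pure arithmetic over the if-terms: each condition at (a, b+1) differs from the one at
  -- (a, b) exactly at one of the three updated cells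
  have T1 : (if 0 < i ∧ j < mxc ∧ (i - 1 < a ∨ (i - 1 = a ∧ j < b + 1)) then ps G (i - 1) j else 0)
      = (if 0 < i ∧ j < mxc ∧ (i - 1 < a ∨ (i - 1 = a ∧ j < b)) then ps G (i - 1) j else 0)
        + (if i = a + 1 ∧ j = b then ps G a b else 0) := by
    by_cases hcase : i = a + 1 ∧ j = b
    · obtain ⟨hia, hjb⟩ := hcase
      subst hia; subst hjb
      rw [if_pos (by omega), if_neg (by omega), if_pos (by omega)]
      simp
    · have e : (0 < i ∧ j < mxc ∧ (i - 1 < a ∨ (i - 1 = a ∧ j < b + 1)))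
          ↔ (0 < i ∧ j < mxc ∧ (i - 1 < a ∨ (i - 1 = a ∧ j < b))) := by omega
      rw [if_neg hcase, if_congr e rfl rfl]
      simp
  have T2 : (if 0 < j ∧ (i < a ∨ (i = a ∧ j - 1 < b + 1)) then ps G i (j - 1) else 0)
      = (if 0 < j ∧ (i < a ∨ (i = a ∧ j - 1 < b)) then ps G i (j - 1) else 0)
        + (if i = a ∧ j = b + 1 then ps G a b else 0) := by
    by_cases hcase : i = a ∧ j = b + 1
    · obtain ⟨hia, hjb⟩ := hcase
      subst hia; subst hjb
      rw [if_pos (by omega), if_neg (by omega), if_pos (by omega)]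
      simp
    · have e : (0 < j ∧ (i < a ∨ (i = a ∧ j - 1 < b + 1)))
          ↔ (0 < j ∧ (i < a ∨ (i = a ∧ j - 1 < b))) := by omega
      rw [if_neg hcase, if_congr e rfl rfl]
      simp
  have T3 : (if 0 < i ∧ 0 < j ∧ (i - 1 < a ∨ (i - 1 = a ∧ j - 1 < b + 1)) then ps G (i - 1) (j - 1) else 0)
      = (if 0 < i ∧ 0 < j ∧ (i - 1 < a ∨ (i - 1 = a ∧ j - 1 < b)) then ps G (i - 1) (j - 1) else 0)
        + (if i = a + 1 ∧ j = b + 1 then ps G a b else 0) := by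
    by_cases hcase : i = a + 1 ∧ j = b + 1
    · obtain ⟨hia, hjb⟩ := hcase
      subst hia; subst hjb
      rw [if_pos (by omega), if_neg (by omega), if_pos (by omega)]
      simp
    · have e : (0 < i ∧ 0 < j ∧ (i - 1 < a ∨ (i - 1 = a ∧ j - 1 < b + 1)))
          ↔ (0 < i ∧ 0 < j ∧ (i - 1 < a ∨ (i - 1 = a ∧ j - 1 < b))) := by omega
      rw [if_neg hcase, if_congr e rfl rfl]
      simp
  rw [T1, T2, T3]
  split_ifs <;> ring

theorem PInv_init {G : Nat → Nat → Int} {mxr mxc : Nat} {g : List (List Int)}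
    (h : ∀ i j : Nat, gg g i j = G i j) : PInv G mxr mxc 0 0 g := by
  intro i j _ _
  rw [if_neg (by omega), if_neg (by omega), if_neg (by omega), h]
  ring

theorem PInv_shift {G : Nat → Nat → Int} {mxr mxc a : Nat} {g : List (List Int)}
    (h : PInv G mxr mxc a mxc g) : PInv G mxr mxc (a + 1) 0 g := by
  intro i j hi hj
  rw [h i j hi hj]
  have e1 : (0 < i ∧ j < mxc ∧ (i - 1 < a + 1 ∨ (i - 1 = a + 1 ∧ j < 0)))
      ↔ (0 < i ∧ j < mxc ∧ (i - 1 < a ∨ (i - 1 = a ∧ j < mxc))) := by omega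
  have e2 : (0 < j ∧ (i < a + 1 ∨ (i = a + 1 ∧ j - 1 < 0)))
      ↔ (0 < j ∧ (i < a ∨ (i = a ∧ j - 1 < mxc))) := by omega
  have e3 : (0 < i ∧ 0 < j ∧ (i - 1 < a + 1 ∨ (i - 1 = a + 1 ∧ j - 1 < 0)))
      ↔ (0 < i ∧ 0 < j ∧ (i - 1 < a ∨ (i - 1 = a ∧ j - 1 < mxc))) := by omega
  rw [if_congr e1 rfl rfl, if_congr e2 rfl rfl, if_congr e3 rfl rfl]

theorem PInv_row {G : Nat → Nat → Int} {mxr mxc a : Nat} (ha : a < mxr) :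
    ∀ b : Nat, b ≤ mxc → ∀ g : List (List Int), Sh (mxr + 1) (mxc + 1) g →
      PInv G mxr mxc a 0 g →
      Sh (mxr + 1) (mxc + 1) ((List.range b).foldl (fun g c => aPrefixStep g a c) g) ∧
        PInv G mxr mxc a b ((List.range b).foldl (fun g c => aPrefixStep g a c) g) := by
  intro b
  induction b with
  | zero => intro _ g hg hInv; exact ⟨hg, hInv⟩
  | succ b ih =>
    intro hb g hg hInv
    obtain ⟨sh, inv⟩ := ih (by omega) g hg hInv
    rw [List.range_succ, List.foldl_append]
    exact PInv_step sh ha (by omega) inv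

theorem PInv_outer {G : Nat → Nat → Int} {mxr mxc : Nat} :
    ∀ a : Nat, a ≤ mxr → ∀ g : List (List Int), Sh (mxr + 1) (mxc + 1) g →
      PInv G mxr mxc 0 0 g →
      Sh (mxr + 1) (mxc + 1)
          ((List.range a).foldl
            (fun g r => (List.range mxc).foldl (fun g c => aPrefixStep g r c) g) g) ∧
        PInv G mxr mxc a 0
          ((List.range a).foldl
            (fun g r => (List.range mxc).foldl (fun g c => aPrefixStep g r c) g) g) := by
  intro a
  induction a with
  | zero => intro _ g hg hInv; exact ⟨hg, hInv⟩
  | succ a ih =>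
    intro ha g hg hInv
    obtain ⟨sh, inv⟩ := ih (by omega) g hg hInv
    rw [List.range_succ, List.foldl_append]
    obtain ⟨sh', inv'⟩ := PInv_row (G := G) (by omega : a < mxr) mxc (le_refl _) _ sh inv
    exact ⟨sh', PInv_shift inv'⟩

theorem PInv_final {G : Nat → Nat → Int} {mxr mxc : Nat} {g : List (List Int)}
    (h : PInv G mxr mxc mxr 0 g) (i j : Nat) (hi : i < mxr) (hj : j < mxc) :
    gg g i j = ps G i j :=
  PInv_extract h i j (by omega) (by omega) (by omega) (by omega) (by omega)

def rectCont (s : List Int) (r c : Int) : Int :=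
  match s with
  | [t, r1, c1, r2, c2, d] =>
    if r1 ≤ r ∧ r ≤ r2 ∧ c1 ≤ c ∧ c ≤ c2 then PySem.List.pyGetD [999, -1, 1] t 0 * d else 0
  | _ => 0

theorem bCellTotal_eq (skill : List (List Int)) (r c : Int) :
    ∀ start : Int, bCellTotal skill r c start
      = start + (skill.map (fun s => rectCont s r c)).sum := by
  induction skill with
  | nil => intro start; simp [bCellTotal]
  | cons s tl ih =>
    intro start
    simp only [bCellTotal, List.foldl_cons, List.map_cons, List.sum_cons]
    rw [show (List.foldl _ _ tl : Int) = bCellTotal tl r c _ from rfl, ih]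
    match s with
    | [] => simp [rectCont]
    | [a] => simp [rectCont]
    | [a,b] => simp [rectCont]
    | [a,b,c'] => simp [rectCont]
    | [a,b,c',d'] => simp [rectCont]
    | [a,b,c',d',e] => simp [rectCont]
    | [t,r1,c1,r2,c2,d] =>
      simp only [rectCont]
      split_ifs <;> ring
    | a::b::c'::d'::e::f::g'::tl' => simp [rectCont]

theorem sum_ind (x : Int) (hx : 0 ≤ x) (r : Nat) :
    (∑ i ∈ Finset.range (r + 1), (if (i : Int) = x then (1 : Int) else 0))
      = if x ≤ (r : Int) then 1 else 0 := by
  induction r with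
  | zero =>
    rw [Finset.sum_range_one]
    split_ifs <;> omega
  | succ r ih =>
    rw [Finset.sum_range_succ, ih]
    have hc : ((r + 1 : Nat) : Int) = (r : Int) + 1 := by push_cast; ring
    rw [hc]
    split_ifs <;> omega

theorem cont4_factor (t r1 c1 r2 c2 d : Int) (i j : Nat) :
    cont4 [t, r1, c1, r2, c2, d] i j
      = (PySem.List.pyGetD [999, -1, 1] t 0 * d)
        * ((if (i : Int) = r1 then (1 : Int) else 0) - (if (i : Int) = r2 + 1 then 1 else 0))
        * ((if (j : Int) = c1 then (1 : Int) else 0) - (if (j : Int) = c2 + 1 then 1 else 0)) := by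
  unfold cont4
  by_cases h1 : (i : Int) = r1 <;> by_cases h2 : (i : Int) = r2 + 1 <;>
    by_cases h3 : (j : Int) = c1 <;> by_cases h4 : (j : Int) = c2 + 1 <;>
    simp [h1, h2, h3, h4] <;> split_ifs <;> first | ring1 | (exfalso; omega)

theorem ps_cont4 {mxr mxc : Nat} (s : List Int) (hs : SkOKb mxr mxc s = true) (r c : Nat) :
    ps (fun i j => cont4 s i j) r c = rectCont s (r : Int) (c : Int) := by
  match s with
  | [t, r1, c1, r2, c2, d] =>
    simp only [SkOKb, decide_eq_true_eq] at hs
    obtain ⟨h1, h2, h3, h4, h5, h6, h7, h8⟩ := hs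
    set v : Int := PySem.List.pyGetD [999, -1, 1] t 0 * d with hv
    unfold ps
    calc (∑ i ∈ Finset.range (r + 1), ∑ j ∈ Finset.range (c + 1), cont4 [t, r1, c1, r2, c2, d] i j)
        = ∑ i ∈ Finset.range (r + 1),
            (v * ((if (i : Int) = r1 then (1 : Int) else 0) - (if (i : Int) = r2 + 1 then 1 else 0)))
            * ∑ j ∈ Finset.range (c + 1),
                ((if (j : Int) = c1 then (1 : Int) else 0) - (if (j : Int) = c2 + 1 then 1 else 0)) := by
          refine Finset.sum_congr rfl ?_
          intro i _
          rw [Finset.mul_sum]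
          refine Finset.sum_congr rfl ?_
          intro j _
          rw [cont4_factor, ← hv]
      _ = (v * (∑ j ∈ Finset.range (c + 1),
              ((if (j : Int) = c1 then (1 : Int) else 0) - (if (j : Int) = c2 + 1 then 1 else 0))))
            * ∑ i ∈ Finset.range (r + 1),
              ((if (i : Int) = r1 then (1 : Int) else 0) - (if (i : Int) = r2 + 1 then 1 else 0)) := by
          conv_rhs => rw [Finset.mul_sum]
          refine Finset.sum_congr rfl ?_
          intro i _
          ring
      _ = rectCont [t, r1, c1, r2, c2, d] (r : Int) (c : Int) := by
          rw [Finset.sum_sub_distrib, Finset.sum_sub_distrib,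
              sum_ind r1 h3 r, sum_ind (r2 + 1) (by omega) r,
              sum_ind c1 h6 c, sum_ind (c2 + 1) (by omega) c]
          simp only [rectCont]
          rw [← hv]
          split_ifs <;> first | ring1 | (exfalso; omega)

def sumContF (skill : List (List Int)) : Nat → Nat → Int := fun i j => sumCont skill i j

theorem ps_sumCont {mxr mxc : Nat} (skill : List (List Int))
    (hsk : ∀ s ∈ skill, SkOKb mxr mxc s = true) (r c : Nat) :
    ps (sumContF skill) r c = (skill.map (fun s => rectCont s (r : Int) (c : Int))).sum := by
  induction skill with
  | nil => simp [sumContF, sumCont, ps]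
  | cons s tl ih =>
    have hs := hsk s (by simp)
    have htl : ∀ x ∈ tl, SkOKb mxr mxc x = true := fun x hx => hsk x (by simp [hx])
    have hsplit : ps (sumContF (s :: tl)) r c
        = ps (fun i j => cont4 s i j) r c + ps (sumContF tl) r c := by
      unfold ps sumContF sumCont
      rw [← Finset.sum_add_distrib]
      refine Finset.sum_congr rfl ?_
      intro i _
      rw [← Finset.sum_add_distrib]
      refine Finset.sum_congr rfl ?_
      intro j _
      simp
    rw [hsplit, ih htl, ps_cont4 (mxr := mxr) (mxc := mxc) s hs]
    simp

theorem foldl_range_congr {α : Type} (n : Nat) (f g : α → Nat → α) (init : α)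
    (h : ∀ (a : α) (k : Nat), k < n → f a k = g a k) :
    (List.range n).foldl f init = (List.range n).foldl g init := by
  induction n generalizing init with
  | zero => simp
  | succ n ih =>
    rw [List.range_succ, List.foldl_append, List.foldl_append]
    simp only [List.foldl_cons, List.foldl_nil]
    rw [ih _ (fun a k hk => h a k (by omega)), h _ n (by omega)]

theorem enum_foldl (mxcN : Nat) (skill : List (List Int)) :
    ∀ (bd : List (List Int)) (s : Nat) (init : Int),
    (PySem.List.enumerate bd (s : Int)).foldl (fun answer p =>
      (List.range mxcN).foldl (fun answer (c : Nat) =>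
        if bCellTotal skill p.1 (c : Int) (PySem.List.pyGetD p.2 (c : Int) 0) ≥ 1
        then answer + 1 else answer) answer) init
    = (List.range bd.length).foldl (fun answer (k : Nat) =>
      (List.range mxcN).foldl (fun answer (c : Nat) =>
        if bCellTotal skill ((s + k : Nat) : Int) (c : Int)
             (PySem.List.pyGetD (bd.getD k []) (c : Int) 0) ≥ 1
        then answer + 1 else answer) answer) init := by
  intro bd
  induction bd with
  | nil => intro s init; simp [PySem.List.enumerate]
  | cons row tl ih =>
    intro s init
    rw [PySem.List.enumerate_cons, List.foldl_cons]
    have hcast : (s : Int) + 1 = ((s + 1 : Nat) : Int) := by push_cast; ring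
    rw [hcast, ih (s + 1)]
    rw [List.length_cons, List.range_succ_eq_map, List.foldl_cons, List.foldl_map]
    have hz : ((s + 0 : Nat) : Int) = (s : Int) := by push_cast; ring
    rw [show ∀ z : Int,
        (List.range tl.length).foldl (fun answer (k : Nat) =>
          (List.range mxcN).foldl (fun answer (c : Nat) =>
            if bCellTotal skill (((s + 1) + k : Nat) : Int) (c : Int)
                 (PySem.List.pyGetD (tl.getD k []) (c : Int) 0) ≥ 1
            then answer + 1 else answer) answer) z
        = (List.range tl.length).foldl (fun answer (k : Nat) =>
          (List.range mxcN).foldl (fun answer (c : Nat) =>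
            if bCellTotal skill ((s + (k + 1) : Nat) : Int) (c : Int)
                 (PySem.List.pyGetD ((row :: tl).getD (k + 1) []) (c : Int) 0) ≥ 1
            then answer + 1 else answer) answer) z
      from fun z => foldl_range_congr _ _ _ z (by
        intro a k hk
        have : ((s + 1) + k : Nat) = (s + (k + 1) : Nat) := by omega
        rw [this]
        rfl)]
    simp [Nat.succ_eq_add_one]

theorem main_eq (board skill : List (List Int))
    (_hne : board ≠ [])
    (_hrows : ∀ row ∈ board, (board.headD []).length ≤ row.length)
    (hsk : ∀ s ∈ skill, SkOKb board.length (board.headD []).length s = true) :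
    solution board skill = solution_alt board skill := by
  have expandA : solution board skill
      = (List.range board.length).foldl (fun answer (r : Nat) =>
          (List.range (board.headD []).length).foldl (fun answer (c : Nat) =>
            if PySem.List.pyGetD (PySem.List.pyGetD board (r : Int) []) (c : Int) 0 +
                 PySem.List.pyGetD (PySem.List.pyGetD
                   ((List.range board.length).foldl
                     (fun g r => (List.range (board.headD []).length).foldl
                       (fun g c => aPrefixStep g r c) g)
                     (skill.foldl aSkillStep
                       (List.replicate (board.length + 1)
                         (List.replicate ((board.headD []).length + 1) 0))))
                   (r : Int) []) (c : Int) 0 ≥ 1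
            then answer + 1 else answer) answer) 0 := rfl
  have expandB : solution_alt board skill
      = (List.range board.length).foldl (fun answer (k : Nat) =>
          (List.range (board.headD []).length).foldl (fun answer (c : Nat) =>
            if bCellTotal skill ((0 + k : Nat) : Int) (c : Int)
                 (PySem.List.pyGetD (board.getD k []) (c : Int) 0) ≥ 1
            then answer + 1 else answer) answer) 0 := by
    unfold solution_alt
    have h := enum_foldl (board.headD []).length skill board 0 0
    simpa using h
  rw [expandA, expandB]
  set mxr := board.length with hmxr
  set mxc := (board.headD []).length with hmxc
  set g1 := skill.foldl aSkillStep
      (List.replicate (mxr + 1) (List.replicate (mxc + 1) 0)) with hg1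
  set g2 := (List.range mxr).foldl
      (fun g r => (List.range mxc).foldl (fun g c => aPrefixStep g r c) g) g1 with hg2
  obtain ⟨hSh1, hgg1⟩ := skillFold (mxr := mxr) (mxc := mxc) skill
    (List.replicate (mxr + 1) (List.replicate (mxc + 1) 0)) (Sh_replicate _ _) hsk
  have hG : ∀ i j : Nat, gg g1 i j = sumContF skill i j := by
    intro i j
    rw [hg1, hgg1 i j, gg_replicate]
    simp [sumContF]
  obtain ⟨hSh2, hInv2⟩ := PInv_outer (G := sumContF skill) mxr (le_refl _) g1 hSh1 (PInv_init hG)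
  have hcell : ∀ r c : Nat, r < mxr → c < mxc →
      gg g2 r c = (skill.map (fun s => rectCont s (r : Int) (c : Int))).sum := by
    intro r c hr hc
    rw [hg2, PInv_final hInv2 r c hr hc, ps_sumCont (mxr := mxr) (mxc := mxc) skill hsk r c]
  refine foldl_range_congr _ _ _ _ ?_
  intro a r hr
  refine foldl_range_congr _ _ _ _ ?_
  intro a' c hc
  have h1 : PySem.List.pyGetD (PySem.List.pyGetD board (r : Int) []) (c : Int) 0
      = (board.getD r []).getD c 0 := by
    simp [PySem.List.pyGetD_natCast]
  have h2 : PySem.List.pyGetD (PySem.List.pyGetD g2 (r : Int) []) (c : Int) 0 = gg g2 r c := by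
    simp [gg, PySem.List.pyGetD_natCast]
  have h3 : PySem.List.pyGetD (board.getD r []) (c : Int) 0 = (board.getD r []).getD c 0 := by
    simp [PySem.List.pyGetD_natCast]
  have h4 : ((0 + r : Nat) : Int) = (r : Int) := by push_cast; ring
  rw [h1, h2, h3, h4, hcell r c hr hc, bCellTotal_eq]

-- ===== VERDICT (by name: the statement is the Claim_ definition above) =====
theorem solution_spec : Claim_equal_solution := by
  intro board skill _ hpre
  unfold Spec_solution
  exact main_eq board skill hpre.1 hpre.2.1 hpre.2.2
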